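-- pv_equiv track=rewrite | github.com/growexx/Hirin.ai-python-BE | Proctoring/faceDetectionServiceFile.py | processing_tab_timestamps
-- ===== SOURCE A (Python) =====
-- def processing_tab_timestamps(tab_switch_time, tab_switch_timestamps):
--     if tab_switch_time > 0:
--         return tab_switch_time
--
--     if not isinstance(tab_switch_timestamps, list) or len(tab_switch_timestamps) % 2 != 0:
--         raise ValueError("Tab switch timestamps must be a list of paired timestamps.")
--
--     def convert_time_to_seconds(timestamp):
--         h, m, s = map(int, timestamp.split(":"))
--         return h * 3600 + m * 60 + s
--
--     total_time = 0
--     for i in range(0, len(tab_switch_timestamps), 2):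
--         start_time = convert_time_to_seconds(tab_switch_timestamps[i])
--         end_time = convert_time_to_seconds(tab_switch_timestamps[i + 1])
--         total_time += end_time - start_time
--
--     return total_time
-- ===== SOURCE B (Python) =====
-- def processing_tab_timestamps(tab_switch_time, tab_switch_timestamps):
--     if tab_switch_time > 0:
--         return tab_switch_time
--
--     if not isinstance(tab_switch_timestamps, list) or len(tab_switch_timestamps) % 2 != 0:
--         raise ValueError("Tab switch timestamps must be a list of paired timestamps.")
--
--     # Single flat pass with an alternating-sign accumulator: each start time is
--     # subtracted, each end time added; no pairing or index arithmetic needed.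
--     total = 0
--     sign = -1
--     for timestamp in tab_switch_timestamps:
--         h, m, s = map(int, timestamp.split(":"))
--         total += sign * (h * 3600 + m * 60 + s)
--         sign = -sign
--     return total
-- ===== Notes on version B (the rewrite author's own statement) =====
-- stated objective: alternative
-- what changed: Replaces A's pair-by-pair loop over indices (i, i+1) in steps of 2 with one flat pass over the elements carrying an alternating-sign accumulator (total += sign*seconds, sign flips each element), so no pairing or index arithmetic remains.
import Mathlib
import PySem

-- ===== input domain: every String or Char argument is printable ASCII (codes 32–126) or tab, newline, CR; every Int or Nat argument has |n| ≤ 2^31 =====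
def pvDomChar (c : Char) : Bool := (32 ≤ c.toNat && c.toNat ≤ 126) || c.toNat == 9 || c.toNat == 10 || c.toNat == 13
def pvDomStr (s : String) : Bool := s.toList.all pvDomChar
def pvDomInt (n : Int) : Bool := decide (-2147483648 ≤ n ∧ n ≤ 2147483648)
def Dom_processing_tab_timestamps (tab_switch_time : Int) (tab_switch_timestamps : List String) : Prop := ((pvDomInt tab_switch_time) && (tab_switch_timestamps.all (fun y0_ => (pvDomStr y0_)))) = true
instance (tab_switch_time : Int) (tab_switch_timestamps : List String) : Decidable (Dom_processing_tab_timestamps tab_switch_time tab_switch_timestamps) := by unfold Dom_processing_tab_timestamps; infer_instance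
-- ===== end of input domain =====

-- B replaces A's pair-by-pair index loop with one flat pass carrying an
-- alternating-sign accumulator (subtract starts, add ends); same cost, different algorithm shape.


-- ===== PORT A =====
-- h, m, s = map(int, timestamp.split(":")); h*3600 + m*60 + s.
-- The `_ => 0` arm is Python's ValueError (wrong field count / non-int field); Pre_ keeps those inputs out.
def convert_time_to_seconds (timestamp : String) : Int :=
  match ((PySem.Str.split? timestamp ":").getD []).map PySem.Int.ofStr? with
  | [some h, some m, some s] => h * 3600 + m * 60 + s
  | _ => 0

def processing_tab_timestamps (tab_switch_time : Int) (tab_switch_timestamps : List String) : Int :=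
  if tab_switch_time > 0 then tab_switch_time
  else
    -- odd length raises ValueError in Python: excluded by Pre_
    (PySem.List.pyRange 0 tab_switch_timestamps.length 2).foldl
      (fun total i =>
        let start_time := convert_time_to_seconds (PySem.List.pyGetD tab_switch_timestamps i "")
        let end_time := convert_time_to_seconds (PySem.List.pyGetD tab_switch_timestamps (i + 1) "")
        total + (end_time - start_time)) 0

-- ===== PORT B =====
-- the inline h,m,s parsing of Source B's loop body (same `_ => 0` convention as A's helper)
def to_seconds (timestamp : String) : Int :=
  match ((PySem.Str.split? timestamp ":").getD []).map PySem.Int.ofStr? with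
  | [some h, some m, some s] => h * 3600 + m * 60 + s
  | _ => 0

def processing_tab_timestamps_alt (tab_switch_time : Int) (tab_switch_timestamps : List String) : Int :=
  if tab_switch_time > 0 then tab_switch_time
  else
    -- odd length raises ValueError in Python: excluded by Pre_
    (tab_switch_timestamps.foldl
      (fun (st : Int × Int) timestamp => (st.1 + st.2 * to_seconds timestamp, -st.2))
      (0, -1)).1

-- ===== PRECONDITION & SPEC =====
-- a timestamp A's conversion accepts: exactly three ':'-separated int()-parsable fields
def pvTimestampOk (t : String) : Bool :=
  match ((PySem.Str.split? t ":").getD []).map PySem.Int.ofStr? with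
  | [some _, some _, some _] => true
  | _ => false

-- Pre_ excludes exactly the inputs where Python A raises ValueError: an odd-length list, or an
-- entry that is not three ':'-separated integers (both only reached when tab_switch_time ≤ 0).
def Pre_processing_tab_timestamps (tab_switch_time : Int) (tab_switch_timestamps : List String) : Prop :=
  tab_switch_time > 0 ∨
    (tab_switch_timestamps.length % 2 = 0 ∧ tab_switch_timestamps.all pvTimestampOk = true)
instance (tab_switch_time : Int) (tab_switch_timestamps : List String) : Decidable (Pre_processing_tab_timestamps tab_switch_time tab_switch_timestamps) := by unfold Pre_processing_tab_timestamps; infer_instance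

def pvWitness_processing_tab_timestamps : Int × List String := (0, ["00:00:01", "00:00:03"])

def Spec_processing_tab_timestamps (tab_switch_time : Int) (tab_switch_timestamps : List String) (out : Int) : Prop := out = processing_tab_timestamps_alt tab_switch_time tab_switch_timestamps
instance (tab_switch_time : Int) (tab_switch_timestamps : List String) (out : Int) : Decidable (Spec_processing_tab_timestamps tab_switch_time tab_switch_timestamps out) := by unfold Spec_processing_tab_timestamps; infer_instance

-- ===== CLAIM (what is proved, stated in full; the proofs are below) =====
def Claim_equal_processing_tab_timestamps : Prop := ∀ (tab_switch_time : Int) (tab_switch_timestamps : List String), Dom_processing_tab_timestamps tab_switch_time tab_switch_timestamps → Pre_processing_tab_timestamps tab_switch_time tab_switch_timestamps → Spec_processing_tab_timestamps tab_switch_time tab_switch_timestamps (processing_tab_timestamps tab_switch_time tab_switch_timestamps)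

-- ===== LEMMAS AND PROOFS =====

-- range(0, 2k, 2) is [2j for j in range(k)]
theorem pyRange_even (k : Nat) :
    PySem.List.pyRange 0 (2 * (k : Int)) 2 = (List.range k).map (fun j => (2 * (j : Nat) : Int)) := by
  rw [PySem.List.pyRange_of_pos 0 (2 * (k : Int)) (by norm_num)]
  have hc : (if (0:Int) < 2 * (k : Int) then ((2 * (k:Int) - 0 + 2 - 1) / 2).toNat else 0) = k := by
    split_ifs with h <;> omega
  rw [hc]
  apply List.map_congr_left
  intro j hj
  ring

-- A's loop over range(0, 2k, 2) as a sum of pairwise differences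
theorem A_char (tss : List String) (k : Nat) (hk : tss.length = 2 * k) :
    (PySem.List.pyRange 0 tss.length 2).foldl
      (fun total i =>
        let start_time := convert_time_to_seconds (PySem.List.pyGetD tss i "")
        let end_time := convert_time_to_seconds (PySem.List.pyGetD tss (i + 1) "")
        total + (end_time - start_time)) 0
    = ((List.range k).map (fun j =>
        convert_time_to_seconds (tss.getD (2 * j + 1) "")
          - convert_time_to_seconds (tss.getD (2 * j) ""))).sum := by
  have hcast : (tss.length : Int) = 2 * (k : Int) := by omega
  rw [hcast, pyRange_even, List.foldl_map]
  simp only []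
  rw [PySem.List.foldl_add (g := fun j : Nat =>
    convert_time_to_seconds (PySem.List.pyGetD tss ((2 * (j : Nat) : Int) + 1) "")
      - convert_time_to_seconds (PySem.List.pyGetD tss (2 * (j : Nat) : Int) ""))]
  rw [zero_add]
  apply congrArg
  apply List.map_congr_left
  intro j hj
  have h1 : ((2 * j : Nat) : Int) + 1 = ((2 * j + 1 : Nat) : Int) := by push_cast; ring
  have h2 : (2 * (j : Nat) : Int) = ((2 * j : Nat) : Int) := by push_cast; ring
  rw [h2, h1, PySem.List.pyGetD_natCast, PySem.List.pyGetD_natCast]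

-- B's alternating-sign fold over an even-length list computes the same pairwise-difference sum
theorem B_char (k : Nat) : ∀ (tss : List String) (t : Int), tss.length = 2 * k →
    (tss.foldl (fun (st : Int × Int) x => (st.1 + st.2 * to_seconds x, -st.2)) (t, -1)).1
    = t + ((List.range k).map (fun j =>
        to_seconds (tss.getD (2 * j + 1) "") - to_seconds (tss.getD (2 * j) ""))).sum := by
  induction k with
  | zero =>
    intro tss t h
    have : tss = [] := List.eq_nil_of_length_eq_zero (by omega)
    subst this; simp
  | succ k ih =>
    intro tss t h
    match tss with
    | [] => simp at h
    | [a] => simp at h; omega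
    | a :: b :: rest =>
      have hr : rest.length = 2 * k := by simp at h; omega
      have step : ((a :: b :: rest).foldl
          (fun (st : Int × Int) x => (st.1 + st.2 * to_seconds x, -st.2)) (t, -1))
        = (rest.foldl (fun (st : Int × Int) x => (st.1 + st.2 * to_seconds x, -st.2))
            (t + (to_seconds b - to_seconds a), -1)) := by
        simp [List.foldl_cons]
        congr 1
        ring_nf
      rw [step, ih rest _ hr]
      rw [List.range_succ_eq_map]
      simp only [List.map_cons, List.map_map, List.sum_cons, Function.comp_def]
      have hz : (a :: b :: rest).getD (2 * 0 + 1) "" = b := rfl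
      have hz0 : (a :: b :: rest).getD (2 * 0) "" = a := rfl
      rw [hz, hz0]
      have hsh : ∀ j : Nat,
          (a :: b :: rest).getD (2 * (j + 1) + 1) "" = rest.getD (2 * j + 1) "" ∧
          (a :: b :: rest).getD (2 * (j + 1)) "" = rest.getD (2 * j) "" := by
        intro j
        constructor
        · have e : 2 * (j + 1) + 1 = (2 * j + 1) + 1 + 1 := by ring
          rw [e, List.getD_cons_succ, List.getD_cons_succ]
        · have e : 2 * (j + 1) = (2 * j) + 1 + 1 := by ring
          rw [e, List.getD_cons_succ, List.getD_cons_succ]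
      have hmap := List.map_congr_left (l := List.range k)
        (f := fun j => to_seconds ((a :: b :: rest).getD (2 * (j + 1) + 1) "")
                - to_seconds ((a :: b :: rest).getD (2 * (j + 1)) ""))
        (g := fun j => to_seconds (rest.getD (2 * j + 1) "") - to_seconds (rest.getD (2 * j) ""))
        (fun j _ => by simp only [(hsh j).1, (hsh j).2])
      rw [hmap]
      ring

-- ===== VERDICT (by name: the statement is the Claim_ definition above) =====
theorem processing_tab_timestamps_spec : Claim_equal_processing_tab_timestamps := by
  intro tst tss _ hpre
  unfold Spec_processing_tab_timestamps processing_tab_timestamps processing_tab_timestamps_alt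
  by_cases hpos : tst > 0
  · simp [hpos]
  · simp only [if_neg hpos]
    rcases hpre with h | ⟨heven, _⟩
    · exact absurd h hpos
    · obtain ⟨k, hk⟩ : ∃ k, tss.length = 2 * k := ⟨tss.length / 2, by omega⟩
      rw [A_char tss k hk, B_char k tss 0 hk, zero_add]
      rfl
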